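-- pv_equiv track=rewrite | github.com/Yunsu0407/algo_lab | lab03/pro1/pro1.py | heap_sort
-- ===== SOURCE A (Python) =====
-- def heap_sort(array, ans):
--     n = len(array)
--
--     # 1단계: 최대 힙(Max Heap) 만들기
--     for i in range(n // 2 - 1, -1, -1):
--         heapify(array, n, i)
--
--     # 2단계: 힙에서 하나씩 꺼내 정렬
--     for end in range(n - 1, 0, -1):
--         # root(최대값)와 마지막 원소 교환
--         array[0], array[end] = array[end], array[0]
--
--         # 교환 후 힙 성질 복구
--         heapify(array, end, 0)
--
--         # heap root 저장
--         ans.append(f"heap root : {array[0]}")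
--
--         # 현재 단계 결과 저장
--         ans.append("정렬 단계: [" + ", ".join(map(str, array)) + "]")
--
--     return array
--
-- def heapify(array, n, i):
--     largest = i  # 현재 노드를 최대값으로 가정
--     left = 2 * i + 1  # 왼쪽 자식 인덱스
--     right = 2 * i + 2  # 오른쪽 자식 인덱스
--
--     # 왼쪽 자식이 존재하고 현재 노드보다 크다면
--     if left < n and array[left] > array[largest]:
--         largest = left
--
--     # 오른쪽 자식이 존재하고 현재 노드보다 크다면
--     if right < n and array[right] > array[largest]:
--         largest = right
--
--     # 최대값이 현재 노드가 아니라면 교환 후 재귀적으로 heapify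
--     if largest != i:
--         array[i], array[largest] = array[largest], array[i]
--         heapify(array, n, largest)
-- ===== SOURCE B (Python) =====
-- def heap_sort(array, ans):
--     # Iterative sift-down (while loop + child tuple) instead of the recursive heapify
--     # helper; same comparisons (strict >, left child checked before right), same logs.
--     n = len(array)
--
--     i = n // 2 - 1
--     while i >= 0:
--         _sift(array, n, i)
--         i -= 1
--
--     end = n - 1
--     while end > 0:
--         array[0], array[end] = array[end], array[0]
--         _sift(array, end, 0)
--         ans.append(f"heap root : {array[0]}")
--         ans.append("정렬 단계: [" + ", ".join(map(str, array)) + "]")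
--         end -= 1
--
--     return array
--
-- def _sift(a, n, i):
--     while True:
--         largest = i
--         for c in (2 * i + 1, 2 * i + 2):
--             if c < n and a[c] > a[largest]:
--                 largest = c
--         if largest == i:
--             return
--         a[i], a[largest] = a[largest], a[i]
--         i = largest
-- ===== Notes on version B (the rewrite author's own statement) =====
-- stated objective: idiomatic
-- what changed: The recursive heapify helper is replaced by an iterative sift-down (a while loop with the two children scanned from a tuple) and the two driver for-range loops become count-down while loops; same comparisons, same swaps, same log lines.
import Mathlib
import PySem

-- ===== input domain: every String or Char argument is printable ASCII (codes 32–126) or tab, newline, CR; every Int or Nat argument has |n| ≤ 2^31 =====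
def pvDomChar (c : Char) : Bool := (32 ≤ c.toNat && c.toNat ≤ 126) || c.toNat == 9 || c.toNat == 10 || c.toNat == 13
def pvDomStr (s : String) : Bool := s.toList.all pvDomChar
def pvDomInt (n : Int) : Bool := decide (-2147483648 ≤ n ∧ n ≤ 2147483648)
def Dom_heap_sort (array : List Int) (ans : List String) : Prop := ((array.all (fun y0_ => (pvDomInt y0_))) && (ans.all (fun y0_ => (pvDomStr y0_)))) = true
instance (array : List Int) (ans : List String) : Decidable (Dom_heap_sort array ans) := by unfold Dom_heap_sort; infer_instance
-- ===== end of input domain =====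

-- B replaces the recursive heapify with an iterative sift-down and while-loop drivers
-- (same comparisons, swaps and log lines); both Pythons also mutate `array`/`ans` in
-- place identically — the equivalence proved here is about the RETURN value.

-- ===== PORT A =====
-- shared low-level helper: Python's simultaneous swap  xs[i], xs[j] = xs[j], xs[i]
def pvSwap (xs : List Int) (i j : Nat) : List Int :=
  let vi := xs.getD i 0
  let vj := xs.getD j 0
  (xs.set i vj).set j vi

-- A's recursive heapify (indices are the nonnegative ints of A's calls, carried as Nat;
-- fuel is only a totality guard: heap size + 1 always suffices, the recursion raises i)
def pvHeapify (fuel : Nat) (arr : List Int) (n i : Nat) : List Int :=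
  match fuel with
  | 0 => arr
  | fuel + 1 =>
    let largest := i
    let left := 2 * i + 1
    let right := 2 * i + 2
    let largest := if left < n ∧ arr.getD left 0 > arr.getD largest 0 then left else largest
    let largest := if right < n ∧ arr.getD right 0 > arr.getD largest 0 then right else largest
    if largest ≠ i then
      pvHeapify fuel (pvSwap arr i largest) n largest
    else arr

def heap_sort (array : List Int) (ans : List String) : List Int :=
  let n := array.length
  -- for i in range(n//2 - 1, -1, -1): heapify(array, n, i)
  let array :=
    (PySem.List.pyRange (PySem.Int.floordiv (n : Int) 2 - 1) (-1) (-1)).foldl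
      (fun a i => pvHeapify (n + 1) a n i.toNat) array
  -- for end in range(n-1, 0, -1): swap, heapify(array, end, 0), two ans.append(...)
  let st :=
    (PySem.List.pyRange ((n : Int) - 1) 0 (-1)).foldl
      (fun (st : List Int × List String) e =>
        let a := pvSwap st.1 0 e.toNat
        let a := pvHeapify (e.toNat + 1) a e.toNat 0
        let ans := st.2 ++ ["heap root : " ++ PySem.Int.toStr (a.getD 0 0)]
        let ans := ans ++ ["정렬 단계: [" ++ PySem.Str.join ", " (a.map PySem.Int.toStr) ++ "]"]
        (a, ans))
      (array, ans)
  st.1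

-- ===== PORT B =====
-- B's iterative sift-down: `while True` becomes tail recursion on the moving index i
-- (fuel = heap size + 1, a totality guard only); the `for c in (2*i+1, 2*i+2)` child
-- scan is a foldl over that two-element list.
def pvSift (fuel : Nat) (a : List Int) (n i : Nat) : List Int :=
  match fuel with
  | 0 => a
  | fuel + 1 =>
    let largest :=
      [2 * i + 1, 2 * i + 2].foldl
        (fun lg c => if c < n ∧ a.getD c 0 > a.getD lg 0 then c else lg) i
    if largest = i then a
    else pvSift fuel (pvSwap a i largest) n largest

-- while i >= 0: _sift(array, n, i); i -= 1   (k = i + 1, counting down to 0)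
def pvBuild (arr : List Int) (n : Nat) : Nat → List Int
  | 0 => arr
  | k + 1 => pvBuild (pvSift (n + 1) arr n k) n k

-- while end > 0: swap; _sift; two appends; end -= 1   (recursion on end itself)
def pvExtract (st : List Int × List String) : Nat → List Int × List String
  | 0 => st
  | e + 1 =>
    let a := pvSwap st.1 0 (e + 1)
    let a := pvSift (e + 2) a (e + 1) 0
    let ans := st.2 ++ ["heap root : " ++ PySem.Int.toStr (a.getD 0 0)]
    let ans := ans ++ ["정렬 단계: [" ++ PySem.Str.join ", " (a.map PySem.Int.toStr) ++ "]"]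
    pvExtract (a, ans) e

def heap_sort_alt (array : List Int) (ans : List String) : List Int :=
  let n := array.length
  (pvExtract (pvBuild array n (n / 2), ans) (n - 1)).1

-- ===== PRECONDITION & SPEC =====
def Spec_heap_sort (array : List Int) (ans : List String) (out : List Int) : Prop := out = heap_sort_alt array ans
instance (array : List Int) (ans : List String) (out : List Int) : Decidable (Spec_heap_sort array ans out) := by unfold Spec_heap_sort; infer_instance

-- ===== CLAIM (what is proved, stated in full; the proofs are below) =====
def Claim_equal_heap_sort : Prop := ∀ (array : List Int) (ans : List String), Dom_heap_sort array ans → Spec_heap_sort array ans (heap_sort array ans)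

-- ===== LEMMAS AND PROOFS =====

-- A's recursive heapify and B's iterative sift-down perform the same swaps.
theorem pvHeapify_eq_pvSift (fuel : Nat) : ∀ (arr : List Int) (n i : Nat),
    pvHeapify fuel arr n i = pvSift fuel arr n i := by
  induction fuel with
  | zero => intro arr n i; rfl
  | succ f ih =>
      intro arr n i
      simp only [pvHeapify, pvSift, List.foldl_cons, List.foldl_nil, ne_eq, ite_not]
      split_ifs <;> first | rfl | exact ih _ _ _

-- A's build-phase countdown foldl is B's pvBuild.
theorem pvBuild_eq (n : Nat) : ∀ (m : Nat) (arr : List Int),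
    (PySem.List.pyRange ((m : Int) - 1) (-1) (-1)).foldl
      (fun a i => pvHeapify (n + 1) a n i.toNat) arr = pvBuild arr n m := by
  intro m
  induction m with
  | zero =>
      intro arr
      rw [PySem.List.pyRange_neg_one_eq_nil (by omega)]
      rfl
  | succ k ih =>
      intro arr
      have h2 : ((k + 1 : Nat) : Int) - 1 = (k : Int) := by push_cast; ring
      rw [h2, PySem.List.pyRange_neg_one_cons (by omega)]
      simp only [List.foldl_cons]
      have h3 : ((k : Int)).toNat = k := by omega
      rw [h3, ih, pvHeapify_eq_pvSift]
      rfl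

-- A's extraction-phase countdown foldl is B's pvExtract.
theorem pvExtract_eq : ∀ (k : Nat) (st : List Int × List String),
    (PySem.List.pyRange (k : Int) 0 (-1)).foldl
      (fun (st : List Int × List String) e =>
        let a := pvSwap st.1 0 e.toNat
        let a := pvHeapify (e.toNat + 1) a e.toNat 0
        let ans := st.2 ++ ["heap root : " ++ PySem.Int.toStr (a.getD 0 0)]
        let ans := ans ++ ["정렬 단계: [" ++ PySem.Str.join ", " (a.map PySem.Int.toStr) ++ "]"]
        (a, ans)) st = pvExtract st k := by
  intro k
  induction k with
  | zero =>
      intro st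
      rw [PySem.List.pyRange_neg_one_eq_nil (by omega)]
      rfl
  | succ e ih =>
      intro st
      rw [PySem.List.pyRange_neg_one_cons (by omega)]
      simp only [List.foldl_cons]
      have h1 : (((e + 1 : Nat) : Int)) - 1 = (e : Int) := by push_cast; ring
      have h2 : (((e + 1 : Nat) : Int)).toNat = e + 1 := by omega
      rw [h1, h2, ih]
      simp only [pvExtract, pvHeapify_eq_pvSift]

theorem heap_sort_eq_alt (array : List Int) (ans : List String) :
    heap_sort array ans = heap_sort_alt array ans := by
  unfold heap_sort heap_sort_alt
  simp only
  have hdiv : PySem.Int.floordiv (array.length : Int) 2 = ((array.length / 2 : Nat) : Int) := by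
    exact_mod_cast PySem.Int.floordiv_natCast array.length 2
  rw [hdiv, pvBuild_eq array.length (array.length / 2)]
  by_cases h0 : array.length = 0
  · rw [h0]
    rw [show ((0 : Nat) : Int) - 1 = -1 from rfl,
        PySem.List.pyRange_neg_one_eq_nil (by omega)]
    rfl
  · have h2 : ((array.length : Int)) - 1 = ((array.length - 1 : Nat) : Int) := by omega
    rw [h2, pvExtract_eq]

-- ===== VERDICT (by name: the statement is the Claim_ definition above) =====
theorem heap_sort_spec : Claim_equal_heap_sort := by
  intro array ans _
  unfold Spec_heap_sort
  exact heap_sort_eq_alt array ans
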